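-- pv_equiv track=rewrite | github.com/cobradeca-a11y/cpp_mvp | backend/association_engine.py | page_system_measure_warnings
-- ===== SOURCE A (Python) =====
-- from typing import Any
--
-- def page_system_measure_warnings(associations: list[dict[str, Any]]) -> list[str]:
--     warnings = []
--     if not associations:
--         warnings.append("Nenhuma página OCR/layout disponível para associação página→sistema→compasso.")
--     if any(str(item.get("association_status", "")).startswith("blocked_") for item in associations):
--         warnings.append("Associação página→sistema→compasso bloqueada enquanto não houver geometria confiável suficiente.")
--     if any(item.get("association_status") == "unassigned_pending_geometry_or_review" for item in associations):
--         warnings.append("Associação página→sistema→compasso permanece pendente de revisão/algoritmo posterior.")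
--     return warnings
-- ===== SOURCE B (Python) =====
-- _MSG_EMPTY = "Nenhuma página OCR/layout disponível para associação página→sistema→compasso."
-- _MSG_BLOCKED = "Associação página→sistema→compasso bloqueada enquanto não houver geometria confiável suficiente."
-- _MSG_PENDING = "Associação página→sistema→compasso permanece pendente de revisão/algoritmo posterior."
--
-- # all 8 possible outputs, indexed by the 3-bit mask (bit0=empty, bit1=blocked, bit2=pending)
-- _TABLE = [
--     [w for bit, w in ((1, _MSG_EMPTY), (2, _MSG_BLOCKED), (4, _MSG_PENDING)) if mask & bit]
--     for mask in range(8)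
-- ]
--
-- def _item_mask(item):
--     status = item.get("association_status")
--     m = 0
--     if isinstance(status, str) and status.startswith("blocked_"):
--         m |= 2
--     if status == "unassigned_pending_geometry_or_review":
--         m |= 4
--     return m
--
-- def page_system_measure_warnings(associations):
--     mask = 0 if associations else 1
--     for item in associations:
--         mask |= _item_mask(item)
--     return _TABLE[mask]
-- ===== Notes on version B (the rewrite author's own statement) =====
-- stated objective: alternative
-- what changed: Instead of A's chain of conditional appends driven by three separate any(...) scans, B folds the items into a 3-bit mask with bitwise-or and returns the answer by indexing a precomputed table of all 8 possible warning lists.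
import Mathlib
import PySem

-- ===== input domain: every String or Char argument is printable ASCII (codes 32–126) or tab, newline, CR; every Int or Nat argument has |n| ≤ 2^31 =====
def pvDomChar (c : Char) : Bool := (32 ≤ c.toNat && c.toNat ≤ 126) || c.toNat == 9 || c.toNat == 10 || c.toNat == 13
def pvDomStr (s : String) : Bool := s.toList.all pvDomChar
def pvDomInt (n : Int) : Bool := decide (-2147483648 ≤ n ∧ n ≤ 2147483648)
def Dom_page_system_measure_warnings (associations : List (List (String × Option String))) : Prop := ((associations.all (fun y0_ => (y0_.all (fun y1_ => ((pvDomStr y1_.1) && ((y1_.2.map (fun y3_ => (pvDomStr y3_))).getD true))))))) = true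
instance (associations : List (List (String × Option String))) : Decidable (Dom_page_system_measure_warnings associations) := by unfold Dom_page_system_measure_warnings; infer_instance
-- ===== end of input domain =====

-- B replaces A's chain of conditional appends driven by three any(...) scans with a
-- bitwise-or fold into a 3-bit mask and a lookup in a precomputed table of all 8 outputs.
-- ===== PORT A =====
def page_system_measure_warnings (associations : List (List (String × Option String))) : List String :=
  -- warnings = []
  let warnings : List String := []
  -- if not associations: append(...)
  let warnings := if associations = [] then warnings ++ ["Nenhuma página OCR/layout disponível para associação página→sistema→compasso."] else warnings
  -- any(str(item.get("association_status", "")).startswith("blocked_") ...)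
  -- item.get(k, "") : missing → "", present None → str(None) = "None", present str s → s
  let warnings := if associations.any (fun item =>
      (match List.lookup "association_status" item with
        | none => ""
        | some none => "None"
        | some (some s) => s).startsWith "blocked_")
    then warnings ++ ["Associação página→sistema→compasso bloqueada enquanto não houver geometria confiável suficiente."] else warnings
  -- any(item.get("association_status") == "unassigned_pending_geometry_or_review" ...)
  let warnings := if associations.any (fun item =>
      List.lookup "association_status" item == some (some "unassigned_pending_geometry_or_review"))
    then warnings ++ ["Associação página→sistema→compasso permanece pendente de revisão/algoritmo posterior."] else warnings
  warnings

-- ===== PORT B =====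
-- the 8-entry table, built exactly as Source B's comprehension over range(8)
def pvTable : List (List String) :=
  (List.range 8).map (fun mask =>
    ([(1, "Nenhuma página OCR/layout disponível para associação página→sistema→compasso."),
      (2, "Associação página→sistema→compasso bloqueada enquanto não houver geometria confiável suficiente."),
      (4, "Associação página→sistema→compasso permanece pendente de revisão/algoritmo posterior.")].filter
        (fun p => mask &&& p.1 != 0)).map Prod.snd)

-- Source B's _item_mask (status None / missing is not a str, so the blocked test is False there)
def pvItemMask (item : List (String × Option String)) : Nat :=
  let status := List.lookup "association_status" item
  let m : Nat := 0
  let m := if (match status with | some (some s) => s.startsWith "blocked_" | _ => false) then m ||| 2 else m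
  let m := if status == some (some "unassigned_pending_geometry_or_review") then m ||| 4 else m
  m

def page_system_measure_warnings_alt (associations : List (List (String × Option String))) : List String :=
  -- mask = 0 if associations else 1; then mask |= _item_mask(item) over the list
  let mask := associations.foldl (fun m item => m ||| pvItemMask item)
    (if associations = [] then 1 else 0)
  -- _TABLE[mask]; mask < 8 always, so Python indexing never raises
  (pvTable[mask]?).getD []

-- ===== PRECONDITION & SPEC =====
def Spec_page_system_measure_warnings (associations : List (List (String × Option String))) (out : List String) : Prop := out = page_system_measure_warnings_alt associations
instance (associations : List (List (String × Option String))) (out : List String) : Decidable (Spec_page_system_measure_warnings associations out) := by unfold Spec_page_system_measure_warnings; infer_instance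

-- ===== CLAIM (what is proved, stated in full; the proofs are below) =====
def Claim_equal_page_system_measure_warnings : Prop := ∀ (associations : List (List (String × Option String))), Dom_page_system_measure_warnings associations → Spec_page_system_measure_warnings associations (page_system_measure_warnings associations)

-- ===== LEMMAS AND PROOFS =====

-- the per-item predicates, named for the lemmas
def pvBlockA (item : List (String × Option String)) : Bool :=
  (match List.lookup "association_status" item with
    | none => ""
    | some none => "None"
    | some (some s) => s).startsWith "blocked_"

def pvBlockB (item : List (String × Option String)) : Bool :=
  match List.lookup "association_status" item with
  | some (some s) => s.startsWith "blocked_"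
  | _ => false

def pvPend (item : List (String × Option String)) : Bool :=
  List.lookup "association_status" item == some (some "unassigned_pending_geometry_or_review")

theorem pvBlock_eq (item : List (String × Option String)) : pvBlockA item = pvBlockB item := by
  unfold pvBlockA pvBlockB
  cases h : List.lookup "association_status" item with
  | none => decide
  | some o => cases o with
    | none => decide
    | some s => rfl

theorem pvItemMask_eq (item : List (String × Option String)) :
    pvItemMask item = (if pvBlockB item then 2 else 0) ||| (if pvPend item then 4 else 0) := by
  unfold pvItemMask pvBlockB pvPend
  rcases h : List.lookup "association_status" item with _ | (_ | s)
  · rfl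
  · rfl
  · by_cases h1 : s.startsWith "blocked_" <;> by_cases h2 : s = "unassigned_pending_geometry_or_review" <;>
      simp [h1, h2]

theorem pvFold_eq (l : List (List (String × Option String))) (m0 : Nat) :
    l.foldl (fun m item => m ||| pvItemMask item) m0
    = m0 ||| (if l.any pvBlockB then 2 else 0) ||| (if l.any pvPend then 4 else 0) := by
  induction l generalizing m0 with
  | nil => simp
  | cons x xs ih =>
    rw [List.foldl_cons, ih, pvItemMask_eq x]
    simp only [List.any_cons]
    by_cases hb : pvBlockB x = true <;> by_cases hp : pvPend x = true <;>
      by_cases hbs : xs.any pvBlockB = true <;> by_cases hps : xs.any pvPend = true <;>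
      simp [hb, hp, hbs, hps, Nat.lor_assoc]

theorem pvAny_block (l : List (List (String × Option String))) :
    l.any pvBlockA = l.any pvBlockB := by
  induction l with
  | nil => rfl
  | cons x xs ih => simp [List.any_cons, ih, pvBlock_eq x]

theorem page_system_measure_warnings_spec : Claim_equal_page_system_measure_warnings := by
  intro associations _
  unfold Spec_page_system_measure_warnings page_system_measure_warnings page_system_measure_warnings_alt
  by_cases h : associations = []
  · subst h; rfl
  · have e1 : (fun item : List (String × Option String) =>
        (match List.lookup "association_status" item with
          | none => ""
          | some none => "None"
          | some (some s) => s).startsWith "blocked_") = pvBlockA := rfl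
    have e2 : (fun item : List (String × Option String) =>
        List.lookup "association_status" item == some (some "unassigned_pending_geometry_or_review")) = pvPend := rfl
    simp only [if_neg h, e1, e2, pvAny_block]
    rw [pvFold_eq]
    have e3 : (associations.any fun item => pvPend item) = associations.any pvPend := rfl
    rw [e3]
    cases hb : associations.any pvBlockB <;> cases hp : associations.any pvPend <;> simp <;> rfl
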